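-- pv_equiv track=rewrite | github.com/programiranje-SKG/naloge-daljse | 01_topovske_bitke/resitev.py | direkten_napad
-- ===== SOURCE A (Python) =====
-- def se_napadata(top1, top2):
--     return top1 != top2 and (top1[0] == top2[0] or top1[1] == top2[1])
--
-- def napadeni(top, topovi):
--     nap = []
--     for top2 in topovi:
--         if se_napadata(top, top2):
--             nap.append(top2)
--     return nap
--
-- def direkten_napad(top1, top2, topovi):
--     nap = napadeni(top1, topovi)
--     if top2 not in nap:
--         return False
--
--     if top1[0] == top2[0]:
--         linija = 1
--     else:
--         linija = 0
--     for top_vm in nap: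
--         if top1 != top_vm != top2 and \
--                 top1[1 - linija] == top_vm[1 - linija] and \
--                 (top1[linija] > top_vm[linija]) != (top2[linija] > top_vm[linija]):
--             return False
--     return True
-- ===== SOURCE B (Python) =====
-- def direkten_napad(top1, top2, topovi):
--     # single pass: keep the minimal distance from top1 to any rook on the shared
--     # line on top2's side; top1 and top2 attack directly iff that nearest rook is top2.
--     if top1 == top2 or (top1[0] != top2[0] and top1[1] != top2[1]):
--         return False
--     if top2 not in topovi:
--         return False
--     linija = 1 if top1[0] == top2[0] else 0
--     sign = 1 if top2[linija] > top1[linija] else -1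
--     najblizja = None
--     for top in topovi:
--         if top[1 - linija] != top1[1 - linija]:
--             continue
--         d = sign * (top[linija] - top1[linija])
--         if d <= 0:
--             continue
--         if najblizja is None or d < najblizja:
--             najblizja = d
--     return najblizja == sign * (top2[linija] - top1[linija])
-- ===== Notes on version B (the rewrite author's own statement) =====
-- stated objective: alternative
-- what changed: Replaces A's two-phase 'build the list of rooks attacking top1, check membership, then scan it for a blocker with a sign-xor betweenness test' by a single pass over topovi that maintains the minimal signed distance from top1 to any rook on the shared line on top2's side, returning True iff that nearest distance is exactly top2's distance.
import Mathlib
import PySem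

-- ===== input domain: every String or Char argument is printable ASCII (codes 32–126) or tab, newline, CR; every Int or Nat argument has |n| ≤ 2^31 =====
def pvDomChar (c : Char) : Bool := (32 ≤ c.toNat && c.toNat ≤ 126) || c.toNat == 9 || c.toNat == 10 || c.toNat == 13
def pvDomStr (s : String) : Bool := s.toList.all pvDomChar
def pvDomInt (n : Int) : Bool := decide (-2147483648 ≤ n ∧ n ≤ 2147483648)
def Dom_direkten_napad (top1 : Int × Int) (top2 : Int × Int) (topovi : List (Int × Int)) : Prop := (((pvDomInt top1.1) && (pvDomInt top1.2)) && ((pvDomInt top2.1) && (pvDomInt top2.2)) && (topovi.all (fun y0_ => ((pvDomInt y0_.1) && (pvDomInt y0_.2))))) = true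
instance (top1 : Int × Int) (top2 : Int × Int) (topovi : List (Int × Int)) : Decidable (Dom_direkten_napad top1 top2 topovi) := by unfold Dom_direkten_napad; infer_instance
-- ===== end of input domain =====

-- B replaces A's build-attacker-list-then-scan-for-blockers structure by one running-minimum
-- pass (nearest rook distance on the shared line on top2's side); same O(n) cost, alternative algorithm.

-- shared indexing helper: Python's t[i] on a pair, only ever called with i ∈ {0, 1} (exact there)
def pyIdx2 (t : Int × Int) (i : Int) : Int := if i == 0 then t.1 else t.2

-- ===== PORT A =====
def se_napadata (t1 t2 : Int × Int) : Bool :=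
  t1 != t2 && (t1.1 == t2.1 || t1.2 == t2.2)

def napadeni (top : Int × Int) (topovi : List (Int × Int)) : List (Int × Int) :=
  topovi.foldl (fun nap t2 => if se_napadata top t2 then nap ++ [t2] else nap) []

-- A's 'for top_vm in nap' loop with early 'return False'
def loopA (top1 top2 : Int × Int) (linija : Int) : List (Int × Int) → Bool
  | [] => true
  | t :: rest =>
    if (top1 != t && t != top2) &&
       (pyIdx2 top1 (1 - linija) == pyIdx2 t (1 - linija)) &&
       (decide (pyIdx2 top1 linija > pyIdx2 t linija) != decide (pyIdx2 top2 linija > pyIdx2 t linija))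
    then false
    else loopA top1 top2 linija rest

def direkten_napad (top1 : Int × Int) (top2 : Int × Int) (topovi : List (Int × Int)) : Bool :=
  let nap := napadeni top1 topovi
  if !(nap.contains top2) then false
  else
    let linija : Int := if top1.1 == top2.1 then 1 else 0
    loopA top1 top2 linija nap

-- ===== PORT B =====
-- B's single pass: 'najblizja' = minimal positive signed distance seen so far
def bestLoop (top1 : Int × Int) (linija sign : Int) : List (Int × Int) → Option Int → Option Int
  | [], best => best
  | t :: rest, best =>
    if pyIdx2 t (1 - linija) != pyIdx2 top1 (1 - linija) then
      bestLoop top1 linija sign rest best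
    else
      let d := sign * (pyIdx2 t linija - pyIdx2 top1 linija)
      if d ≤ 0 then bestLoop top1 linija sign rest best
      else
        match best with
        | none => bestLoop top1 linija sign rest (some d)
        | some m => if d < m then bestLoop top1 linija sign rest (some d)
                    else bestLoop top1 linija sign rest best

def direkten_napad_alt (top1 : Int × Int) (top2 : Int × Int) (topovi : List (Int × Int)) : Bool :=
  if top1 == top2 || (top1.1 != top2.1 && top1.2 != top2.2) then false
  else if !(topovi.contains top2) then false
  else
    let linija : Int := if top1.1 == top2.1 then 1 else 0
    let sign : Int := if pyIdx2 top2 linija > pyIdx2 top1 linija then 1 else -1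
    bestLoop top1 linija sign topovi none == some (sign * (pyIdx2 top2 linija - pyIdx2 top1 linija))

-- ===== PRECONDITION & SPEC =====
def Spec_direkten_napad (top1 : Int × Int) (top2 : Int × Int) (topovi : List (Int × Int)) (out : Bool) : Prop := out = direkten_napad_alt top1 top2 topovi
instance (top1 : Int × Int) (top2 : Int × Int) (topovi : List (Int × Int)) (out : Bool) : Decidable (Spec_direkten_napad top1 top2 topovi out) := by unfold Spec_direkten_napad; infer_instance

-- ===== CLAIM (what is proved, stated in full; the proofs are below) =====
def Claim_equal_direkten_napad : Prop := ∀ (top1 : Int × Int) (top2 : Int × Int) (topovi : List (Int × Int)), Dom_direkten_napad top1 top2 topovi → Spec_direkten_napad top1 top2 topovi (direkten_napad top1 top2 topovi)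

-- ===== LEMMAS AND PROOFS =====

-- B-side abbreviations used only by the proofs
def candB (top1 : Int × Int) (linija sign : Int) (t : Int × Int) : Bool :=
  (pyIdx2 t (1 - linija) == pyIdx2 top1 (1 - linija)) &&
  !(sign * (pyIdx2 t linija - pyIdx2 top1 linija) ≤ 0)

def dfun (top1 : Int × Int) (linija sign : Int) (t : Int × Int) : Int :=
  sign * (pyIdx2 t linija - pyIdx2 top1 linija)

def blockA (top1 top2 : Int × Int) (linija : Int) (t : Int × Int) : Bool :=
  (top1 != t && t != top2) &&
  (pyIdx2 top1 (1 - linija) == pyIdx2 t (1 - linija)) &&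
  (decide (pyIdx2 top1 linija > pyIdx2 t linija) != decide (pyIdx2 top2 linija > pyIdx2 t linija))

theorem napadeni_eq (top : Int × Int) (topovi : List (Int × Int)) :
    napadeni top topovi = topovi.filter (fun t => se_napadata top t) := by
  unfold napadeni
  rw [PySem.List.foldl_append_if_eq_filter]
  simp

theorem loopA_eq_all (top1 top2 : Int × Int) (linija : Int) (xs : List (Int × Int)) :
    loopA top1 top2 linija xs = xs.all (fun t => !(blockA top1 top2 linija t)) := by
  induction xs with
  | nil => rfl
  | cons t rest ih =>
    rw [List.all_cons, ← ih]
    show (if blockA top1 top2 linija t then false else loopA top1 top2 linija rest) = _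
    cases hb : blockA top1 top2 linija t <;> simp [hb]

theorem bestLoop_some (top1 : Int × Int) (linija sign : Int) (xs : List (Int × Int)) (m : Int) :
    bestLoop top1 linija sign xs (some m) =
      some (((xs.filter (candB top1 linija sign)).map (dfun top1 linija sign)).foldl min m) := by
  induction xs generalizing m with
  | nil => rfl
  | cons t rest ih =>
    by_cases h1 : pyIdx2 t (1 - linija) = pyIdx2 top1 (1 - linija)
    · by_cases h2 : sign * (pyIdx2 t linija - pyIdx2 top1 linija) ≤ 0
      · have hc : candB top1 linija sign t = false := by simp [candB, h2]
        simp [bestLoop, h1, h2, hc, ih, List.filter_cons]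
      · have hc : candB top1 linija sign t = true := by simp [candB, h1]; omega
        have hrhs : ((t :: rest).filter (candB top1 linija sign)).map (dfun top1 linija sign)
            = dfun top1 linija sign t ::
              ((rest.filter (candB top1 linija sign)).map (dfun top1 linija sign)) := by
          simp [List.filter_cons, hc]
        have hd : dfun top1 linija sign t = sign * (pyIdx2 t linija - pyIdx2 top1 linija) := rfl
        rw [hrhs, List.foldl_cons, hd]
        simp only [bestLoop]
        rw [if_neg (show ¬ ((pyIdx2 t (1 - linija) != pyIdx2 top1 (1 - linija)) = true) by
              simp [h1]),
            if_neg h2]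
        by_cases h3 : sign * (pyIdx2 t linija - pyIdx2 top1 linija) < m
        · rw [if_pos h3, ih,
              show min m (sign * (pyIdx2 t linija - pyIdx2 top1 linija))
                  = sign * (pyIdx2 t linija - pyIdx2 top1 linija) from by omega]
        · rw [if_neg h3, ih,
              show min m (sign * (pyIdx2 t linija - pyIdx2 top1 linija)) = m from by omega]
    · have hc : candB top1 linija sign t = false := by simp [candB, h1]
      simp [bestLoop, h1, hc, ih, List.filter_cons]

theorem bestLoop_none (top1 : Int × Int) (linija sign : Int) (xs : List (Int × Int)) :
    bestLoop top1 linija sign xs none =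
      ((xs.filter (candB top1 linija sign)).map (dfun top1 linija sign)).min? := by
  induction xs with
  | nil => rfl
  | cons t rest ih =>
    by_cases h1 : pyIdx2 t (1 - linija) = pyIdx2 top1 (1 - linija)
    · by_cases h2 : sign * (pyIdx2 t linija - pyIdx2 top1 linija) ≤ 0
      · have hc : candB top1 linija sign t = false := by simp [candB, h2]
        simp [bestLoop, h1, h2, hc, ih, List.filter_cons]
      · have hc : candB top1 linija sign t = true := by simp [candB, h1]; omega
        have hrhs : ((t :: rest).filter (candB top1 linija sign)).map (dfun top1 linija sign)
            = dfun top1 linija sign t ::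
              ((rest.filter (candB top1 linija sign)).map (dfun top1 linija sign)) := by
          simp [List.filter_cons, hc]
        have hd : dfun top1 linija sign t = sign * (pyIdx2 t linija - pyIdx2 top1 linija) := rfl
        rw [hrhs, List.min?, hd]
        simp only [bestLoop]
        rw [if_neg (show ¬ ((pyIdx2 t (1 - linija) != pyIdx2 top1 (1 - linija)) = true) by
              simp [h1]),
            if_neg h2, bestLoop_some]
    · have hc : candB top1 linija sign t = false := by simp [candB, h1]
      simp [bestLoop, h1, hc, ih, List.filter_cons]

theorem se_guard (top1 top2 : Int × Int) :
    (top1 == top2 || (top1.1 != top2.1 && top1.2 != top2.2)) = !se_napadata top1 top2 := by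
  by_cases e : top1 = top2 <;> by_cases a : top1.1 = top2.1 <;> by_cases b : top1.2 = top2.2 <;>
    simp_all [se_napadata, Prod.ext_iff, bne, Bool.not_not]

-- ===== VERDICT (by name: the statement is the Claim_ definition above) =====
theorem direkten_napad_spec : Claim_equal_direkten_napad := by
  intro top1 top2 topovi _
  show direkten_napad top1 top2 topovi = direkten_napad_alt top1 top2 topovi
  have lhs_eq : direkten_napad top1 top2 topovi =
      (if (!((napadeni top1 topovi).contains top2)) = true then false
       else loopA top1 top2 (if (top1.1 == top2.1) = true then (1:Int) else 0) (napadeni top1 topovi)) := rfl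
  have rhs_eq : direkten_napad_alt top1 top2 topovi =
      (if (top1 == top2 || (top1.1 != top2.1 && top1.2 != top2.2)) = true then false
       else if (!(topovi.contains top2)) = true then false
       else (bestLoop top1 (if (top1.1 == top2.1) = true then (1:Int) else 0)
              (if pyIdx2 top2 (if (top1.1 == top2.1) = true then (1:Int) else 0) > pyIdx2 top1 (if (top1.1 == top2.1) = true then (1:Int) else 0) then (1:Int) else -1) topovi none
             == some ((if pyIdx2 top2 (if (top1.1 == top2.1) = true then (1:Int) else 0) > pyIdx2 top1 (if (top1.1 == top2.1) = true then (1:Int) else 0) then (1:Int) else -1) *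
                (pyIdx2 top2 (if (top1.1 == top2.1) = true then (1:Int) else 0) - pyIdx2 top1 (if (top1.1 == top2.1) = true then (1:Int) else 0))))) := rfl
  rw [lhs_eq, rhs_eq, se_guard, napadeni_eq]
  by_cases hs : se_napadata top1 top2 = true
  · rw [hs]
    by_cases hm : top2 ∈ topovi
    · have hc1 : (List.filter (fun t => se_napadata top1 t) topovi).contains top2 = true := by
        simp [List.mem_filter, hm, hs]
      have hc2 : topovi.contains top2 = true := by simp [hm]
      simp only [hc1, hc2, Bool.not_true, Bool.false_eq_true, if_false, loopA_eq_all, bestLoop_none]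
      have hne : top1 ≠ top2 := by
        intro e; rw [e] at hs; simp [se_napadata] at hs
      by_cases hl : top1.1 = top2.1
      · have hl' : (top1.1 == top2.1) = true := by simp [hl]
        have h22 : top1.2 ≠ top2.2 := fun e => hne (Prod.ext hl e)
        simp only [hl', if_true, show pyIdx2 top2 1 = top2.2 from rfl,
          show pyIdx2 top1 1 = top1.2 from rfl]
        by_cases hsgn : top2.2 > top1.2
        · rw [if_pos hsgn, Bool.eq_iff_iff]
          simp [List.all_eq_true, List.mem_filter, List.min?_eq_some_iff, List.mem_map,
            candB, dfun, blockA, se_napadata, pyIdx2, Prod.ext_iff]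
          have hm2 : (top1.1, top2.2) ∈ topovi := by
            have e : (top1.1, top2.2) = top2 := Prod.ext hl rfl
            rw [e]; exact hm
          constructor
          · intro H
            refine ⟨⟨hm2, hsgn⟩, ?_⟩
            intro b x hxmem hlt hbx
            have := H top1.1 x hxmem
            omega
          · rintro ⟨⟨hm2', hlt'⟩, Hub⟩ a b hab
            by_cases hx : top1.1 = a
            · by_cases hx2 : top1.2 < b
              · have h3 := Hub (b - top1.2) b (by rw [← hx] at hab; exact hab) hx2 rfl
                omega
              · omega
            · omega
        · rw [if_neg hsgn, Bool.eq_iff_iff]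
          simp [List.all_eq_true, List.mem_filter, List.min?_eq_some_iff, List.mem_map,
            candB, dfun, blockA, se_napadata, pyIdx2, Prod.ext_iff]
          have hm2 : (top1.1, top2.2) ∈ topovi := by
            have e : (top1.1, top2.2) = top2 := Prod.ext hl rfl
            rw [e]; exact hm
          constructor
          · intro H
            refine ⟨⟨hm2, by omega⟩, ?_⟩
            intro b x hxmem hlt hbx
            have := H top1.1 x hxmem
            omega
          · rintro ⟨⟨hm2', hlt'⟩, Hub⟩ a b hab
            by_cases hx : top1.1 = a
            · by_cases hx2 : b < top1.2
              · have h3 := Hub (top1.2 - b) b (by rw [← hx] at hab; exact hab) hx2 rfl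
                omega
              · omega
            · omega
      · have hl' : (top1.1 == top2.1) = false := by simp [hl]
        have h22 : top1.2 = top2.2 := by
          have h := hs
          simp only [se_napadata, Bool.and_eq_true, bne_iff_ne, ne_eq, Bool.or_eq_true,
            beq_iff_eq] at h
          rcases h.2 with h' | h'
          · exact absurd h' hl
          · exact h'
        simp only [hl', Bool.false_eq_true, if_false, show pyIdx2 top2 0 = top2.1 from rfl,
          show pyIdx2 top1 0 = top1.1 from rfl]
        by_cases hsgn : top2.1 > top1.1
        · rw [if_pos hsgn, Bool.eq_iff_iff]
          simp [List.all_eq_true, List.mem_filter, List.min?_eq_some_iff, List.mem_map,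
            candB, dfun, blockA, se_napadata, pyIdx2, Prod.ext_iff]
          have hm2 : (top2.1, top1.2) ∈ topovi := by
            have e : (top2.1, top1.2) = top2 := Prod.ext rfl h22
            rw [e]; exact hm
          constructor
          · intro H
            refine ⟨⟨hm2, hsgn⟩, ?_⟩
            intro b x hxmem hlt hbx
            have := H x top1.2 hxmem
            omega
          · rintro ⟨⟨hm2', hlt'⟩, Hub⟩ a b hab
            by_cases hx : top1.2 = b
            · by_cases hx2 : top1.1 < a
              · have h3 := Hub (a - top1.1) a (by rw [← hx] at hab; exact hab) hx2 rfl
                omega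
              · omega
            · omega
        · rw [if_neg hsgn, Bool.eq_iff_iff]
          simp [List.all_eq_true, List.mem_filter, List.min?_eq_some_iff, List.mem_map,
            candB, dfun, blockA, se_napadata, pyIdx2, Prod.ext_iff]
          have hm2 : (top2.1, top1.2) ∈ topovi := by
            have e : (top2.1, top1.2) = top2 := Prod.ext rfl h22
            rw [e]; exact hm
          constructor
          · intro H
            refine ⟨⟨hm2, by omega⟩, ?_⟩
            intro b x hxmem hlt hbx
            have := H x top1.2 hxmem
            omega
          · rintro ⟨⟨hm2', hlt'⟩, Hub⟩ a b hab
            by_cases hx : top1.2 = b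
            · by_cases hx2 : a < top1.1
              · have h3 := Hub (top1.1 - a) a (by rw [← hx] at hab; exact hab) hx2 rfl
                omega
              · omega
            · omega
    · have hc1 : (List.filter (fun t => se_napadata top1 t) topovi).contains top2 = false := by
        simp [List.mem_filter, hm]
      have hc2 : topovi.contains top2 = false := by simp [hm]
      simp [hm]
  · have hs' : se_napadata top1 top2 = false := by simpa using hs
    rw [hs']
    have hc1 : (List.filter (fun t => se_napadata top1 t) topovi).contains top2 = false := by
      simp [List.mem_filter, hs']
    simp [hs']
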